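-- pv_equiv track=rewrite | github.com/varunu28/A-Kata-A-Day | Python/String_Evaluation.py | string_evaluation
-- ===== SOURCE A (Python) =====
-- def string_evaluation(strng, conditions):
--     ans = []
--     for i in conditions:
--         if '==' in i:
--             temp = i.split('==')
--             if temp[1].isnumeric() and temp[0].isnumeric():
--                 ans.append(int(temp[0]) == int(temp[1]))
--             elif temp[1].isnumeric():
--                 ans.append(strng.count(temp[0]) == int(temp[1]))
--             elif temp[0].isnumeric():
--                 ans.append(int(temp[0]) == strng.count(temp[1]))
--             else:
--                 ans.append(strng.count(temp[0]) == strng.count(temp[1]))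
--         elif '!=' in i:
--             temp = i.split('!=')
--             if temp[1].isnumeric() and temp[0].isnumeric():
--                 ans.append(int(temp[0]) != int(temp[1]))
--             elif temp[1].isnumeric():
--                 ans.append(strng.count(temp[0]) != int(temp[1]))
--             elif temp[0].isnumeric():
--                 ans.append(int(temp[0]) != strng.count(temp[1]))
--             else:
--                 ans.append(strng.count(temp[0]) != strng.count(temp[1]))
--         elif '>=' in i:
--             temp = i.split('>=')
--             if temp[1].isnumeric() and temp[0].isnumeric():
--                 ans.append(int(temp[0]) >= int(temp[1]))
--             elif temp[1].isnumeric():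
--                 ans.append(strng.count(temp[0]) >= int(temp[1]))
--             elif temp[0].isnumeric():
--                 ans.append(int(temp[0]) >= strng.count(temp[1]))
--             else:
--                 ans.append(strng.count(temp[0]) >= strng.count(temp[1]))
--         elif '<=' in i:
--             temp = i.split('<=')
--             if temp[1].isnumeric() and temp[0].isnumeric():
--                 ans.append(int(temp[0]) <= int(temp[1]))
--             elif temp[1].isnumeric():
--                 ans.append(strng.count(temp[0]) <= int(temp[1]))
--             elif temp[0].isnumeric():
--                 ans.append(int(temp[0]) <= strng.count(temp[1]))
--             else:
--                 ans.append(strng.count(temp[0]) <= strng.count(temp[1]))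
--         elif '>' in i:
--             temp = i.split('>')
--             if temp[1].isnumeric() and temp[0].isnumeric():
--                 ans.append(int(temp[0]) > int(temp[1]))
--             elif temp[1].isnumeric():
--                 ans.append(strng.count(temp[0]) > int(temp[1]))
--             elif temp[0].isnumeric():
--                 ans.append(int(temp[0]) > strng.count(temp[1]))
--             else:
--                 ans.append(strng.count(temp[0]) > strng.count(temp[1]))
--         elif '<' in i:
--             temp = i.split('<')
--             if temp[1].isnumeric() and temp[0].isnumeric():
--                 ans.append(int(temp[0]) < int(temp[1]))
--             elif temp[1].isnumeric():
--                 ans.append(strng.count(temp[0]) < int(temp[1]))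
--             elif temp[0].isnumeric():
--                 ans.append(int(temp[0]) < strng.count(temp[1]))
--             else:
--                 ans.append(strng.count(temp[0]) < strng.count(temp[1]))
--
--     return ans
-- ===== SOURCE B (Python) =====
-- OP_ORDER = ('==', '!=', '>=', '<=', '>', '<')
-- SIGNS = {'==': [0], '!=': [-1, 1], '>=': [0, 1], '<=': [-1, 0], '>': [1], '<': [-1]}
--
--
-- def string_evaluation(strng, conditions):
--     def first_op(cond):
--         for op in OP_ORDER:
--             if op in cond:
--                 return op
--         return None
--
--     def val(tok):
--         return int(tok) if tok.isnumeric() else strng.count(tok)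
--
--     # stage 1: parse each condition into an (operator, lhs, rhs) triple
--     parsed = []
--     for cond in conditions:
--         op = first_op(cond)
--         if op is not None:
--             lhs, rhs = cond.split(op)[:2]
--             parsed.append((op, lhs, rhs))
--
--     # stage 2: every comparison collapses to one three-way comparison:
--     # the sign of val(lhs) - val(rhs), tested against the operator's allowed signs
--     ans = []
--     for op, lhs, rhs in parsed:
--         d = val(lhs) - val(rhs)
--         sign = (d > 0) - (d < 0)
--         ans.append(sign in SIGNS[op])
--     return ans
-- ===== Notes on version B (the rewrite author's own statement) =====
-- stated objective: alternative
-- what changed: Replaces A's six copy-pasted comparison blocks (each with a four-way isnumeric branch) by a two-stage pipeline: first parse every condition into an (operator, lhs, rhs) triple, then evaluate each triple by a single three-way comparison -- the sign of val(lhs)-val(rhs) tested against a per-operator set of allowed signs -- instead of executing a distinct comparison per operator.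
import Mathlib
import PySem

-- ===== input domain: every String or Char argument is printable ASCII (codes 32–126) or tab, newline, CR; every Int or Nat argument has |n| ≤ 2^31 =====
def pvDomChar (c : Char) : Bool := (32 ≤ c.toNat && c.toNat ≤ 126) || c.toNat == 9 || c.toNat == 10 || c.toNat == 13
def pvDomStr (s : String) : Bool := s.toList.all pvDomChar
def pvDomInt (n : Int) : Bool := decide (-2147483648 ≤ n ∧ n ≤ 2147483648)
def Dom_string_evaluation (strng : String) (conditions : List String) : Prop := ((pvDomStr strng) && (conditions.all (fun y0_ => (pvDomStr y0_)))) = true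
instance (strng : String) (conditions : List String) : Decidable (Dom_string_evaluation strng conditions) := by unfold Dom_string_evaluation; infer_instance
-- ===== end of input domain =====

-- B replaces A's six copy-pasted comparison blocks by a two-stage pipeline:
-- parse each condition into an (op, lhs, rhs) triple, then evaluate every triple by
-- one three-way comparison (the sign of val(lhs)-val(rhs)) against allowed-sign sets.

-- ===== PORT A =====
-- Python isnumeric = strIsdigit on the printable-ASCII domain; int(t) is exact via
-- ofStr? (always some on the isdigit-guarded branches, so getD 0 is never the default);
-- temp[k] is exact via getD (split on a contained separator yields ≥ 2 pieces).
-- Loop body of A, one branch block per operator in A's elif order.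
def pvStepA (strng : String) (ans : List Bool) (i : String) : List Bool :=
  if PySem.Str.isIn "==" i then
    let temp := ((PySem.Str.split? i "==").getD [])
    let t0 := temp.getD 0 ""
    let t1 := temp.getD 1 ""
    if PySem.Str.strIsdigit t1 && PySem.Str.strIsdigit t0 then
      ans ++ [decide ((PySem.Int.ofStr? t0).getD 0 = (PySem.Int.ofStr? t1).getD 0)]
    else if PySem.Str.strIsdigit t1 then
      ans ++ [decide ((PySem.Str.count strng t0 : Int) = (PySem.Int.ofStr? t1).getD 0)]
    else if PySem.Str.strIsdigit t0 then
      ans ++ [decide ((PySem.Int.ofStr? t0).getD 0 = (PySem.Str.count strng t1 : Int))]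
    else
      ans ++ [decide ((PySem.Str.count strng t0 : Int) = (PySem.Str.count strng t1 : Int))]
  else if PySem.Str.isIn "!=" i then
    let temp := ((PySem.Str.split? i "!=").getD [])
    let t0 := temp.getD 0 ""
    let t1 := temp.getD 1 ""
    if PySem.Str.strIsdigit t1 && PySem.Str.strIsdigit t0 then
      ans ++ [decide ((PySem.Int.ofStr? t0).getD 0 ≠ (PySem.Int.ofStr? t1).getD 0)]
    else if PySem.Str.strIsdigit t1 then
      ans ++ [decide ((PySem.Str.count strng t0 : Int) ≠ (PySem.Int.ofStr? t1).getD 0)]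
    else if PySem.Str.strIsdigit t0 then
      ans ++ [decide ((PySem.Int.ofStr? t0).getD 0 ≠ (PySem.Str.count strng t1 : Int))]
    else
      ans ++ [decide ((PySem.Str.count strng t0 : Int) ≠ (PySem.Str.count strng t1 : Int))]
  else if PySem.Str.isIn ">=" i then
    let temp := ((PySem.Str.split? i ">=").getD [])
    let t0 := temp.getD 0 ""
    let t1 := temp.getD 1 ""
    if PySem.Str.strIsdigit t1 && PySem.Str.strIsdigit t0 then
      ans ++ [decide ((PySem.Int.ofStr? t0).getD 0 ≥ (PySem.Int.ofStr? t1).getD 0)]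
    else if PySem.Str.strIsdigit t1 then
      ans ++ [decide ((PySem.Str.count strng t0 : Int) ≥ (PySem.Int.ofStr? t1).getD 0)]
    else if PySem.Str.strIsdigit t0 then
      ans ++ [decide ((PySem.Int.ofStr? t0).getD 0 ≥ (PySem.Str.count strng t1 : Int))]
    else
      ans ++ [decide ((PySem.Str.count strng t0 : Int) ≥ (PySem.Str.count strng t1 : Int))]
  else if PySem.Str.isIn "<=" i then
    let temp := ((PySem.Str.split? i "<=").getD [])
    let t0 := temp.getD 0 ""
    let t1 := temp.getD 1 ""
    if PySem.Str.strIsdigit t1 && PySem.Str.strIsdigit t0 then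
      ans ++ [decide ((PySem.Int.ofStr? t0).getD 0 ≤ (PySem.Int.ofStr? t1).getD 0)]
    else if PySem.Str.strIsdigit t1 then
      ans ++ [decide ((PySem.Str.count strng t0 : Int) ≤ (PySem.Int.ofStr? t1).getD 0)]
    else if PySem.Str.strIsdigit t0 then
      ans ++ [decide ((PySem.Int.ofStr? t0).getD 0 ≤ (PySem.Str.count strng t1 : Int))]
    else
      ans ++ [decide ((PySem.Str.count strng t0 : Int) ≤ (PySem.Str.count strng t1 : Int))]
  else if PySem.Str.isIn ">" i then
    let temp := ((PySem.Str.split? i ">").getD [])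
    let t0 := temp.getD 0 ""
    let t1 := temp.getD 1 ""
    if PySem.Str.strIsdigit t1 && PySem.Str.strIsdigit t0 then
      ans ++ [decide ((PySem.Int.ofStr? t0).getD 0 > (PySem.Int.ofStr? t1).getD 0)]
    else if PySem.Str.strIsdigit t1 then
      ans ++ [decide ((PySem.Str.count strng t0 : Int) > (PySem.Int.ofStr? t1).getD 0)]
    else if PySem.Str.strIsdigit t0 then
      ans ++ [decide ((PySem.Int.ofStr? t0).getD 0 > (PySem.Str.count strng t1 : Int))]
    else
      ans ++ [decide ((PySem.Str.count strng t0 : Int) > (PySem.Str.count strng t1 : Int))]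
  else if PySem.Str.isIn "<" i then
    let temp := ((PySem.Str.split? i "<").getD [])
    let t0 := temp.getD 0 ""
    let t1 := temp.getD 1 ""
    if PySem.Str.strIsdigit t1 && PySem.Str.strIsdigit t0 then
      ans ++ [decide ((PySem.Int.ofStr? t0).getD 0 < (PySem.Int.ofStr? t1).getD 0)]
    else if PySem.Str.strIsdigit t1 then
      ans ++ [decide ((PySem.Str.count strng t0 : Int) < (PySem.Int.ofStr? t1).getD 0)]
    else if PySem.Str.strIsdigit t0 then
      ans ++ [decide ((PySem.Int.ofStr? t0).getD 0 < (PySem.Str.count strng t1 : Int))]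
    else
      ans ++ [decide ((PySem.Str.count strng t0 : Int) < (PySem.Str.count strng t1 : Int))]
  else ans

def string_evaluation (strng : String) (conditions : List String) : List Bool :=
  conditions.foldl (pvStepA strng) []

-- ===== PORT B =====
-- module-level OP_ORDER tuple and SIGNS dict of Source B
def pvOpOrder : List String := ["==", "!=", ">=", "<=", ">", "<"]

def pvSigns : PySem.Dict String (List Int) :=
  ((((((PySem.Dict.empty.insert "==" [0]).insert "!=" [-1, 1]).insert ">=" [0, 1]).insert
      "<=" [-1, 0]).insert ">" [1]).insert "<" [-1])

-- first_op(cond): first operator of OP_ORDER contained in cond, None if none is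
def pvFirstOp (cond : String) : List String → Option String
  | [] => none
  | op :: rest => if PySem.Str.isIn op cond then some op else pvFirstOp cond rest

-- val(tok) = int(tok) if tok.isnumeric() else strng.count(tok)  (isnumeric = strIsdigit on ASCII)
def pvVal (strng tok : String) : Int :=
  if PySem.Str.strIsdigit tok then (PySem.Int.ofStr? tok).getD 0
  else (PySem.Str.count strng tok : Int)

-- stage-1 loop body: parse cond into (op, lhs, rhs), or skip it
def pvParseStep (acc : List (String × String × String)) (cond : String) :
    List (String × String × String) :=
  match pvFirstOp cond pvOpOrder with
  | none => acc
  | some op =>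
    let parts := (PySem.Str.split? cond op).getD []
    acc ++ [(op, parts.getD 0 "", parts.getD 1 "")]

-- sign = (d > 0) - (d < 0)
def pvSign (d : Int) : Int := (if 0 < d then 1 else 0) - (if d < 0 then 1 else 0)

-- stage-2 body: sign of val(lhs) - val(rhs), tested against the operator's allowed signs
def pvEvalTriple (strng : String) (t : String × String × String) : Bool :=
  (pvSigns.getD t.1 []).contains (pvSign (pvVal strng t.2.1 - pvVal strng t.2.2))

def string_evaluation_alt (strng : String) (conditions : List String) : List Bool :=
  (conditions.foldl pvParseStep []).foldl (fun ans t => ans ++ [pvEvalTriple strng t]) []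

-- ===== PRECONDITION & SPEC =====
def Spec_string_evaluation (strng : String) (conditions : List String) (out : List Bool) : Prop := out = string_evaluation_alt strng conditions
instance (strng : String) (conditions : List String) (out : List Bool) : Decidable (Spec_string_evaluation strng conditions out) := by unfold Spec_string_evaluation; infer_instance

-- ===== CLAIM (what is proved, stated in full; the proofs are below) =====
def Claim_equal_string_evaluation : Prop := ∀ (strng : String) (conditions : List String), Dom_string_evaluation strng conditions → Spec_string_evaluation strng conditions (string_evaluation strng conditions)

-- ===== LEMMAS AND PROOFS =====

-- what stage 1 produces for one condition
def pvParseOne (cond : String) : List (String × String × String) :=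
  match pvFirstOp cond pvOpOrder with
  | none => []
  | some op =>
    let parts := (PySem.Str.split? cond op).getD []
    [(op, parts.getD 0 "", parts.getD 1 "")]

lemma pvParseStep_eq (acc : List (String × String × String)) (cond : String) :
    pvParseStep acc cond = acc ++ pvParseOne cond := by
  unfold pvParseStep pvParseOne
  cases pvFirstOp cond pvOpOrder <;> simp

lemma pvSigns_eq : pvSigns.getD "==" [] = [0] ∧ pvSigns.getD "!=" [] = [-1, 1] ∧
    pvSigns.getD ">=" [] = [0, 1] ∧ pvSigns.getD "<=" [] = [-1, 0] ∧
    pvSigns.getD ">" [] = [1] ∧ pvSigns.getD "<" [] = [-1] := by decide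

-- the three-way comparison characterised
lemma pvSign_eq_zero_iff (a b : Int) : pvSign (a - b) = 0 ↔ a = b := by
  simp only [pvSign]; split_ifs <;> omega

lemma pvSign_eq_one_iff (a b : Int) : pvSign (a - b) = 1 ↔ b < a := by
  simp only [pvSign]; split_ifs <;> omega

lemma pvSign_eq_neg_one_iff (a b : Int) : pvSign (a - b) = -1 ↔ a < b := by
  simp only [pvSign]; split_ifs <;> omega

set_option maxHeartbeats 1000000 in
-- one step of A produces exactly the stage-2 evaluation of the stage-1 parse
lemma pvStepA_eq (strng : String) (ans : List Bool) (i : String) :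
    pvStepA strng ans i = ans ++ (pvParseOne i).map (pvEvalTriple strng) := by
  simp only [pvStepA, pvParseOne, pvFirstOp, pvOpOrder]
  split_ifs <;>
    simp_all [pvEvalTriple, pvVal, pvSigns_eq.1, pvSigns_eq.2.1, pvSigns_eq.2.2.1,
      pvSigns_eq.2.2.2.1, pvSigns_eq.2.2.2.2.1, pvSigns_eq.2.2.2.2.2,
      pvSign_eq_zero_iff, pvSign_eq_one_iff, pvSign_eq_neg_one_iff] <;>
    first
      | omega
      | (rw [Bool.eq_iff_iff]; simp; omega)

-- ===== VERDICT (by name: the statement is the Claim_ definition above) =====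
theorem string_evaluation_spec : Claim_equal_string_evaluation := by
  intro strng conditions _
  unfold Spec_string_evaluation string_evaluation string_evaluation_alt
  have hA : conditions.foldl (pvStepA strng) [] =
      [] ++ conditions.flatMap (fun i => (pvParseOne i).map (pvEvalTriple strng)) := by
    rw [← PySem.List.foldl_append_eq_flatMap]
    exact PySem.List.foldl_congr_mem _ _ _ _ (fun acc x _ => pvStepA_eq strng acc x)
  have hP : conditions.foldl pvParseStep [] =
      [] ++ conditions.flatMap pvParseOne := by
    rw [← PySem.List.foldl_append_eq_flatMap]
    exact PySem.List.foldl_congr_mem _ _ _ _ (fun acc x _ => pvParseStep_eq acc x)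
  rw [hA, hP, List.nil_append, List.nil_append,
    PySem.List.foldl_append_singleton_eq_map, List.nil_append, List.map_flatMap]
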